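-- pv_equiv track=rewrite | github.com/SauloEdu/ttsVoice | xtts.py | fragmentar_texto
-- ===== SOURCE A (Python) =====
-- def fragmentar_texto(texto, tamanho_maximo=200):
--     """
--     Fragmenta o texto em frases, respeitando a pontuação e o tamanho máximo,
--     e substitui pontos finais por vírgulas nos fragmentos, exceto no último.
--     """
--     fragmentos = []
--     fragmento_atual = ""
--
--     i = 0
--     while i < len(texto):
--         caractere = texto[i]
--         fragmento_atual += caractere
--
--         if caractere in ('.', '!', '?', ';'):
--             if len(fragmento_atual.strip()) > 0:  # Verifica se o fragmento não está vazio
--                 fragmentos.append(fragmento_atual.strip())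
--                 fragmento_atual = ""
--         elif i + 1 == len(texto) and fragmento_atual.strip():  # Verificação corrigida para o último fragmento
--             # Adiciona o último fragmento, caso exista e não seja vazio
--             fragmentos.append(fragmento_atual.strip())
--
--         i += 1
--
--     # Substitui '.' por ',' em todos os fragmentos, exceto o último
--     for j in range(len(fragmentos) - 1):
--         fragmentos[j] = fragmentos[j].replace('.', ',')
--
--     return fragmentos
-- ===== SOURCE B (Python) =====
-- def fragmentar_texto(texto, tamanho_maximo=200):
--     # One pass recording slice boundaries at punctuation, then comprehensions;
--     # no mutable character buffer and no in-place replacement pass.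
--     frases = []
--     inicio = 0
--     for i, c in enumerate(texto):
--         if c in '.!?;':
--             frases.append(texto[inicio:i + 1])
--             inicio = i + 1
--     fragmentos = [f.strip() for f in frases]
--     cauda = texto[inicio:].strip()
--     if cauda:
--         fragmentos.append(cauda)
--     return [f.replace('.', ',') for f in fragmentos[:-1]] + fragmentos[-1:]
-- ===== Notes on version B (the rewrite author's own statement) =====
-- stated objective: faster
-- what changed: B replaces A's char-by-char mutable-buffer state machine (with its last-character special case and the in-place index-mutation replace pass) by a single pass that records slice boundaries at punctuation, a derived stripped tail, and comprehensions for stripping and the dot-to-comma rewrite.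
import Mathlib
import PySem

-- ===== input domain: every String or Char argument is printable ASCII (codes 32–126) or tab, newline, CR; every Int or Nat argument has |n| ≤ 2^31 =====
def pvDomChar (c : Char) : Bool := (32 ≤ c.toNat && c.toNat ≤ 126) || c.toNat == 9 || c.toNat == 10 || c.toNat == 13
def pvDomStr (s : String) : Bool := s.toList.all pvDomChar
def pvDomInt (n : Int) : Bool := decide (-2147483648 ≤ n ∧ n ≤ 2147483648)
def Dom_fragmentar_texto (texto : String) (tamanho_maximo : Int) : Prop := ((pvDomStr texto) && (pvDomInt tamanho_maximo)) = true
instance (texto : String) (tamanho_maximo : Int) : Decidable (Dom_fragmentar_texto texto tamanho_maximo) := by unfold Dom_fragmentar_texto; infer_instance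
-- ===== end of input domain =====

-- B replaces A's char-by-char mutable-buffer state machine (with its last-character special case and
-- in-place index-mutation replace pass) by one pass recording slice boundaries plus comprehensions,
-- avoiding A's quadratic repeated string concatenation (timing: measurably faster).
-- tamanho_maximo is unused by both, as in A.

-- ===== PORT A =====
def fragLoopA : List Char → List Char → List String → List String
  | [], _, fragmentos => fragmentos
  | caractere :: rest, fragmento_atual, fragmentos =>
    let frag := fragmento_atual ++ [caractere]
    if caractere ∈ ['.', '!', '?', ';'] then
      if 0 < (PySem.Chars.strip frag).length then
        fragLoopA rest [] (fragmentos ++ [String.ofList (PySem.Chars.strip frag)])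
      else
        fragLoopA rest frag fragmentos
    else if rest = [] ∧ PySem.Chars.strip frag ≠ [] then
      fragLoopA rest frag (fragmentos ++ [String.ofList (PySem.Chars.strip frag)])
    else
      fragLoopA rest frag fragmentos

def fragmentar_texto (texto : String) (tamanho_maximo : Int) : List String :=
  let fragmentos := fragLoopA texto.toList [] []
  (PySem.List.pyRange 0 ((fragmentos.length : Int) - 1) 1).foldl
    (fun fs j => fs.set j.toNat (PySem.Str.replace (PySem.List.pyGetD fs j "") "." ",")) fragmentos

-- ===== PORT B =====
def fragStepB (texto : List Char) (st : Int × List (List Char)) (p : Int × Char) : Int × List (List Char) :=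
  if PySem.Chars.isIn [p.2] ['.', '!', '?', ';'] then
    (p.1 + 1, st.2 ++ [PySem.List.slice texto (some st.1) (some (p.1 + 1))])
  else st

def fragmentar_texto_alt (texto : String) (tamanho_maximo : Int) : List String :=
  let st := (PySem.List.enumerate texto.toList 0).foldl (fragStepB texto.toList) ((0 : Int), [])
  let fragmentos0 := st.2.map (fun f => String.ofList (PySem.Chars.strip f))
  let cauda := PySem.Chars.strip (PySem.List.slice texto.toList (some st.1) none)
  let fragmentos := if cauda ≠ [] then fragmentos0 ++ [String.ofList cauda] else fragmentos0
  (PySem.List.slice fragmentos none (some (-1))).map (fun f => PySem.Str.replace f "." ",") ++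
    PySem.List.slice fragmentos (some (-1)) none

-- ===== PRECONDITION & SPEC =====
def Spec_fragmentar_texto (texto : String) (tamanho_maximo : Int) (out : List String) : Prop := out = fragmentar_texto_alt texto tamanho_maximo
instance (texto : String) (tamanho_maximo : Int) (out : List String) : Decidable (Spec_fragmentar_texto texto tamanho_maximo out) := by unfold Spec_fragmentar_texto; infer_instance

-- ===== CLAIM (what is proved, stated in full; the proofs are below) =====
def Claim_equal_fragmentar_texto : Prop := ∀ (texto : String) (tamanho_maximo : Int), Dom_fragmentar_texto texto tamanho_maximo → Spec_fragmentar_texto texto tamanho_maximo (fragmentar_texto texto tamanho_maximo)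

-- ===== LEMMAS AND PROOFS =====

-- punctuation-terminated chunks of pend ++ cs (cut points inside cs), and the leftover tail
def chunksFrom (pend : List Char) : List Char → List (List Char)
  | [] => []
  | c :: rs => if c ∈ ['.', '!', '?', ';'] then (pend ++ [c]) :: chunksFrom [] rs
               else chunksFrom (pend ++ [c]) rs

def restFrom (pend : List Char) : List Char → List Char
  | [] => pend
  | c :: rs => if c ∈ ['.', '!', '?', ';'] then restFrom [] rs else restFrom (pend ++ [c]) rs

lemma strip_snoc_ne_nil (l : List Char) (c : Char) (h : PySem.Chars.isspace c = false) :
    PySem.Chars.strip (l ++ [c]) ≠ [] := by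
  have hl : ∃ x : List Char, PySem.Chars.lstrip (l ++ [c]) = x ++ [c] := by
    simp only [PySem.Chars.lstrip, List.dropWhile_append]
    split
    · exact ⟨[], by simp [List.dropWhile, h]⟩
    · exact ⟨List.dropWhile PySem.Chars.isspace l, rfl⟩
  obtain ⟨x, hx⟩ := hl
  simp only [PySem.Chars.strip, hx, PySem.Chars.rstrip]
  simp [List.dropWhile, h]

lemma fragLoopA_eq : ∀ (cs frag : List Char) (acc : List String),
    (frag = [] ∨ cs ≠ []) →
    fragLoopA cs frag acc
      = acc ++ (chunksFrom frag cs).map (fun f => String.ofList (PySem.Chars.strip f))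
          ++ (if PySem.Chars.strip (restFrom frag cs) = [] then []
              else [String.ofList (PySem.Chars.strip (restFrom frag cs))]) := by
  intro cs
  induction cs with
  | nil =>
    intro frag acc h
    rcases h with h | h
    · subst h
      simp [fragLoopA, chunksFrom, restFrom, PySem.Chars.strip, PySem.Chars.lstrip, PySem.Chars.rstrip]
    · exact absurd rfl h
  | cons c rs ih =>
    intro frag acc h
    by_cases hc : c ∈ ['.', '!', '?', ';']
    · have hsp : PySem.Chars.isspace c = false := by
        fin_cases hc <;> decide
      have hne := strip_snoc_ne_nil frag c hsp
      have hlen : 0 < (PySem.Chars.strip (frag ++ [c])).length := by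
        cases hstrip : PySem.Chars.strip (frag ++ [c]) with
        | nil => exact absurd hstrip hne
        | cons x xs => simp
      simp only [fragLoopA, hc, if_pos, hlen, if_true, chunksFrom, restFrom]
      rw [ih [] _ (Or.inl rfl)]
      simp [List.map_cons]
    · simp only [fragLoopA, hc, if_neg, if_false, chunksFrom, restFrom]
      by_cases hrs : rs = []
      · subst hrs
        by_cases hst : PySem.Chars.strip (frag ++ [c]) = []
        · simp [fragLoopA, hst, chunksFrom, restFrom]
        · simp [fragLoopA, hst, chunksFrom, restFrom]
      · have : ¬ (rs = [] ∧ PySem.Chars.strip (frag ++ [c]) ≠ []) := by simp [hrs]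
        simp only [this, if_false]
        exact ih (frag ++ [c]) acc (Or.inr hrs)

lemma tiling : ∀ (cs pend : List Char), pend ++ cs = (chunksFrom pend cs).flatten ++ restFrom pend cs := by
  intro cs
  induction cs with
  | nil => intro pend; simp [chunksFrom, restFrom]
  | cons c rs ih =>
    intro pend
    by_cases hc : c ∈ ['.', '!', '?', ';'] <;>
      simp only [chunksFrom, restFrom, hc, if_true, if_false, List.flatten_cons]
    · conv_lhs => rw [show rs = (chunksFrom [] rs).flatten ++ restFrom [] rs from by simpa using ih []]
      simp
    · rw [← ih (pend ++ [c])]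
      simp

lemma isIn_singleton_mem (c : Char) (l : List Char) : PySem.Chars.isIn [c] l = decide (c ∈ l) := by
  by_cases h : c ∈ l
  · simp only [h, decide_true]
    rw [PySem.Chars.isIn_iff_infix]
    obtain ⟨a, b, rfl⟩ := List.append_of_mem h
    exact ⟨a, b, by simp⟩
  · simp only [h, decide_false]
    rw [PySem.Chars.isIn_eq_false_iff]
    intro hinf
    exact h (hinf.mem (by simp))

lemma fragLoopB_eq (texto : List Char) : ∀ (cs : List Char) (a : Nat) (pend : List Char) (fr : List (List Char)),
    texto.drop a = pend ++ cs →
    (PySem.List.enumerate cs ((a : Int) + pend.length)).foldl (fragStepB texto) ((a : Int), fr)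
      = (((a + ((chunksFrom pend cs).flatten).length : Nat) : Int), fr ++ chunksFrom pend cs) := by
  intro cs
  induction cs with
  | nil => intro a pend fr h; simp [PySem.List.enumerate_nil, chunksFrom]
  | cons c rs ih =>
    intro a pend fr h
    rw [PySem.List.enumerate_cons]
    simp only [List.foldl_cons]
    have e2 : pend ++ c :: rs = (pend ++ [c]) ++ rs := by simp
    by_cases hc : c ∈ ['.', '!', '?', ';']
    · have hslice : PySem.List.slice texto (some (a : Int)) (some ((a : Int) + (pend.length : Int) + 1)) = pend ++ [c] := by
        have e1 : (a : Int) + (pend.length : Int) + 1 = (a : Int) + ((pend.length + 1 : Nat) : Int) := by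
          push_cast; ring
        rw [e1, PySem.List.slice_natCast_add, h, e2]
        exact List.take_left' (by simp)
      have hstep : fragStepB texto ((a : Int), fr) ((a : Int) + (pend.length : Int), c)
          = ((a : Int) + (pend.length : Int) + 1, fr ++ [pend ++ [c]]) := by
        simp only [fragStepB, isIn_singleton_mem, hc, decide_true, if_true]
        rw [hslice]
      rw [hstep]
      have hdd : texto.drop (a + pend.length + 1) = (texto.drop a).drop (pend.length + 1) := by
        rw [List.drop_drop, Nat.add_assoc]
      have hdrop : texto.drop (a + pend.length + 1) = [] ++ rs := by
        rw [hdd, h, e2, show pend.length + 1 = (pend ++ [c]).length from by simp, List.drop_left]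
        simp
      have IH := ih (a + pend.length + 1) [] (fr ++ [pend ++ [c]]) hdrop
      simp only [List.length_nil, Nat.cast_zero, add_zero] at IH
      have e3 : (a : Int) + (pend.length : Int) + 1 = ((a + pend.length + 1 : Nat) : Int) := by
        push_cast; ring
      rw [e3, IH]
      simp only [chunksFrom, hc, if_true, List.flatten_cons, Prod.mk.injEq]
      constructor
      · push_cast
        simp
        omega
      · simp
    · have hstep : fragStepB texto ((a : Int), fr) ((a : Int) + (pend.length : Int), c) = ((a : Int), fr) := by
        simp [fragStepB, isIn_singleton_mem, hc]
      rw [hstep]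
      have hdrop : texto.drop a = (pend ++ [c]) ++ rs := by rw [h, e2]
      have e3 : (a : Int) + (pend.length : Int) + 1 = (a : Int) + (((pend ++ [c]).length : Nat) : Int) := by
        push_cast
        simp
        ring
      rw [e3, ih a (pend ++ [c]) fr hdrop]
      simp only [chunksFrom, hc, if_false]

lemma replace_foldl (l : List String) :
    (PySem.List.pyRange 0 ((l.length : Int) - 1) 1).foldl
      (fun fs j => fs.set j.toNat (PySem.Str.replace (PySem.List.pyGetD fs j "") "." ",")) l
    = l.dropLast.map (fun f => PySem.Str.replace f "." ",") ++ l.drop (l.length - 1) := by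
  have aux : ∀ (k : Nat), k ≤ l.length →
      (PySem.List.pyRange 0 (k : Int) 1).foldl
        (fun fs j => fs.set j.toNat (PySem.Str.replace (PySem.List.pyGetD fs j "") "." ",")) l
      = (l.take k).map (fun f => PySem.Str.replace f "." ",") ++ l.drop k := by
    intro k
    induction k with
    | zero => intro _; simp [PySem.List.pyRange_one_eq_nil]
    | succ k ihk =>
      intro hk
      have hk' : k < l.length := by omega
      have hcast : ((k + 1 : Nat) : Int) = (k : Int) + 1 := by push_cast; ring
      rw [hcast, PySem.List.pyRange_one_succ_right (by positivity), List.foldl_append,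
        ihk (by omega)]
      simp only [List.foldl_cons, List.foldl_nil]
      have hmlen : ((l.take k).map (fun f => PySem.Str.replace f "." ",")).length = k := by
        simp [List.length_take, Nat.min_eq_left (le_of_lt hk')]
      have hget : PySem.List.pyGetD
          ((l.take k).map (fun f => PySem.Str.replace f "." ",") ++ l.drop k) (k : Int) "" = l[k] := by
        rw [PySem.List.pyGetD_eq_getElem _ _ (by positivity) (by simp; omega)]
        rw [List.getElem_append_right (by omega)]
        rw [List.getElem_drop]
        congr 1
        omega
      rw [hget]
      have htoNat : ((k : Int)).toNat = k := by omega
      rw [htoNat, List.set_append, if_neg (by omega), hmlen, Nat.sub_self,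
        List.drop_eq_getElem_cons hk', List.set_cons_zero]
      rw [List.take_add_one, List.getElem?_eq_getElem hk']
      simp
      rw [List.take_add_one]
      simp [List.getElem?_map, List.getElem?_eq_getElem hk']
  by_cases hnil : l = []
  · subst hnil
    simp [PySem.List.pyRange_one_eq_nil]
  · have hlen : 1 ≤ l.length := by
      cases l with
      | nil => exact absurd rfl hnil
      | cons x xs => simp
    have hcast : ((l.length : Int) - 1) = ((l.length - 1 : Nat) : Int) := by push_cast [hlen]; ring
    rw [hcast, aux (l.length - 1) (by omega), List.dropLast_eq_take]

-- ===== VERDICT (by name: the statement is the Claim_ definition above) =====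
theorem fragmentar_texto_spec : Claim_equal_fragmentar_texto := by
  intro texto tm _
  unfold Spec_fragmentar_texto fragmentar_texto fragmentar_texto_alt
  have hB := fragLoopB_eq texto.toList texto.toList 0 [] [] (by simp)
  simp only [Nat.cast_zero, List.length_nil, zero_add, add_zero,
    List.nil_append] at hB
  rw [hB]
  rw [fragLoopA_eq texto.toList [] [] (Or.inl rfl)]
  have hgen : ∀ (F R t : List Char), t = F ++ R → t.drop F.length = R := by
    rintro F R t rfl
    exact List.drop_left
  have hdrop : texto.toList.drop ((chunksFrom [] texto.toList).flatten).length
      = restFrom [] texto.toList :=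
    hgen _ _ _ (by simpa using tiling texto.toList [])
  dsimp only
  rw [PySem.List.slice_from_natCast, hdrop]
  rw [replace_foldl]
  rw [PySem.List.slice_to_neg_one, PySem.List.slice_from_neg_one]
  by_cases hst : PySem.Chars.strip (restFrom [] texto.toList) = [] <;>
    simp [hst]
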